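-- pv_equiv track=rewrite | github.com/dmazurki/ALHE | camera_placing/board_utils.py | get_board_from_string
-- ===== SOURCE A (Python) =====
-- def get_board_from_string(board_string):
--     result = [[]]
--     for character in board_string:
--         if character == '0':
--             result[-1].append(False)
--         elif character == '1':
--             result[-1].append(True)
--         elif character == ';':
--             result.append([])
--
--     return result
-- ===== SOURCE B (Python) =====
-- def get_board_from_string(board_string):
--     return [[c == '1' for c in segment if c in '01']
--             for segment in board_string.split(';')]
-- ===== Notes on version B (the rewrite author's own statement) =====
-- stated objective: idiomatic
-- what changed: Replaces A's single streaming pass that mutates the current last row (with a special ';' branch) by a two-phase str.split on the separator followed by a per-segment comprehension that filters to '0'/'1' and maps to booleans.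
import Mathlib
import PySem

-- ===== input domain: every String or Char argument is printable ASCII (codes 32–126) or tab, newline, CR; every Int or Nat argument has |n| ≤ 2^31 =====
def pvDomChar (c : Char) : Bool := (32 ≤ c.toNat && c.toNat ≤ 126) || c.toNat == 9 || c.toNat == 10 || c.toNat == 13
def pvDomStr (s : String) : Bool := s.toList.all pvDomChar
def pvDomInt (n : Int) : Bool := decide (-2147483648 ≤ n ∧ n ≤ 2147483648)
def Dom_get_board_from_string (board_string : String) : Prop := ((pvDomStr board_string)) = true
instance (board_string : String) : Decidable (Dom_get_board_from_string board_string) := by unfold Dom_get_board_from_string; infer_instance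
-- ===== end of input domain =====

-- B replaces A's single streaming pass (mutating the current last row, with a ';' branch)
-- by split-on-';' followed by a per-segment filter-and-map comprehension (idiomatic, same cost).

-- ===== PORT A =====
-- result[-1].append(b): modify the last row in place ([] never occurs; the [] case only totalizes)
def pvAppendLast (res : List (List Bool)) (b : Bool) : List (List Bool) :=
  match res with
  | [] => []
  | [r] => [r ++ [b]]
  | r :: rest => r :: pvAppendLast rest b

def pvStepA (result : List (List Bool)) (character : Char) : List (List Bool) :=
  if character = '0' then pvAppendLast result false
  else if character = '1' then pvAppendLast result true
  else if character = ';' then result ++ [[]]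
  else result

def get_board_from_string (board_string : String) : List (List Bool) :=
  board_string.toList.foldl pvStepA [[]]

-- ===== PORT B =====
-- [c == '1' for c in segment if c in '01']
def pvRowOf (segment : List Char) : List Bool :=
  (segment.filter (fun c => c == '0' || c == '1')).map (· == '1')

def get_board_from_string_alt (board_string : String) : List (List Bool) :=
  (PySem.Chars.splitOn board_string.toList [';']).map pvRowOf

-- ===== PRECONDITION & SPEC =====
def Spec_get_board_from_string (board_string : String) (out : List (List Bool)) : Prop := out = get_board_from_string_alt board_string
instance (board_string : String) (out : List (List Bool)) : Decidable (Spec_get_board_from_string board_string out) := by unfold Spec_get_board_from_string; infer_instance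

-- ===== CLAIM (what is proved, stated in full; the proofs are below) =====
def Claim_equal_get_board_from_string : Prop := ∀ (board_string : String), Dom_get_board_from_string board_string → Spec_get_board_from_string board_string (get_board_from_string board_string)

-- ===== LEMMAS AND PROOFS =====

-- spec-side segmentation of the character stream at ';'
def pvSegs : List Char → List (List Char)
  | [] => [[]]
  | c :: cs => if c = ';' then [] :: pvSegs cs else (pvSegs cs).modifyHead (c :: ·)

theorem pvSegs_ne_nil (cs : List Char) : pvSegs cs ≠ [] := by
  induction cs with
  | nil => simp [pvSegs]
  | cons c cs ih =>
    simp only [pvSegs]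
    split_ifs
    · simp
    · cases hseg : pvSegs cs with
      | nil => exact absurd hseg ih
      | cons r rs => simp [List.modifyHead]

theorem pvAppendLast_append (acc : List (List Bool)) (pre : List Bool) (b : Bool) :
    pvAppendLast (acc ++ [pre]) b = acc ++ [pre ++ [b]] := by
  induction acc with
  | nil => simp [pvAppendLast]
  | cons a acc ih =>
    cases acc with
    | nil => simp [pvAppendLast]
    | cons a' acc' => simpa [pvAppendLast] using ih

theorem pvSplitOn_go_spec (cs : List Char) (fuel : Nat) (cur : List Char)
    (acc : List (List Char)) (h : cs.length ≤ fuel) :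
    PySem.Chars.splitOn.go [';'] fuel cs cur acc
      = acc.reverse ++ (pvSegs cs).modifyHead (cur.reverse ++ ·) := by
  induction cs generalizing fuel cur acc with
  | nil =>
    cases fuel <;> simp [PySem.Chars.splitOn.go, pvSegs, List.modifyHead]
  | cons c cs ih =>
    cases fuel with
    | zero => simp at h
    | succ f =>
      by_cases hc : c = ';'
      · subst hc
        rw [show PySem.Chars.splitOn.go [';'] (f+1) (';' :: cs) cur acc
              = PySem.Chars.splitOn.go [';'] f cs [] (cur.reverse :: acc) by
            simp [PySem.Chars.splitOn.go, List.isPrefixOf]]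
        rw [ih f [] (cur.reverse :: acc) (by simpa using Nat.le_of_succ_le_succ h)]
        have hne := pvSegs_ne_nil cs
        cases hseg : pvSegs cs with
        | nil => exact absurd hseg hne
        | cons r rs => simp [pvSegs, List.modifyHead, hseg]
      · rw [show PySem.Chars.splitOn.go [';'] (f+1) (c :: cs) cur acc
              = PySem.Chars.splitOn.go [';'] f cs (c :: cur) acc by
            simp only [PySem.Chars.splitOn.go, List.isPrefixOf]
            rw [if_neg (by simp [Ne.symm hc])]]
        rw [ih f (c :: cur) acc (by simpa using Nat.le_of_succ_le_succ h)]
        have hne := pvSegs_ne_nil cs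
        cases hseg : pvSegs cs with
        | nil => exact absurd hseg hne
        | cons r rs => simp [pvSegs, List.modifyHead, hseg, hc]

theorem pvSplitOn_eq_segs (cs : List Char) :
    PySem.Chars.splitOn cs [';'] = pvSegs cs := by
  have := pvSplitOn_go_spec cs (cs.length + 1) [] [] (by omega)
  simp only [PySem.Chars.splitOn] at *
  rw [this]
  have hne := pvSegs_ne_nil cs
  cases hseg : pvSegs cs with
  | nil => exact absurd hseg hne
  | cons r rs => simp [List.modifyHead]

theorem pvFoldl_spec (cs : List Char) (acc : List (List Bool)) (pre : List Bool) :
    cs.foldl pvStepA (acc ++ [pre])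
      = acc ++ ((pvSegs cs).map pvRowOf).modifyHead (pre ++ ·) := by
  induction cs generalizing acc pre with
  | nil => simp [pvSegs, pvRowOf, List.modifyHead]
  | cons c cs ih =>
    have hne := pvSegs_ne_nil cs
    simp only [List.foldl_cons]
    by_cases h0 : c = '0'
    · subst h0
      rw [show pvStepA (acc ++ [pre]) '0' = acc ++ [pre ++ [false]] by
            simp [pvStepA, pvAppendLast_append]]
      rw [ih acc (pre ++ [false])]
      cases hseg : pvSegs cs with
      | nil => exact absurd hseg hne
      | cons r rs => simp [pvSegs, hseg, List.modifyHead, pvRowOf]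
    · by_cases h1 : c = '1'
      · subst h1
        rw [show pvStepA (acc ++ [pre]) '1' = acc ++ [pre ++ [true]] by
              simp [pvStepA, pvAppendLast_append]]
        rw [ih acc (pre ++ [true])]
        cases hseg : pvSegs cs with
        | nil => exact absurd hseg hne
        | cons r rs => simp [pvSegs, hseg, List.modifyHead, pvRowOf]
      · by_cases hs : c = ';'
        · subst hs
          rw [show pvStepA (acc ++ [pre]) ';' = (acc ++ [pre]) ++ [[]] by
                simp [pvStepA]]
          rw [ih (acc ++ [pre]) []]
          cases hseg : pvSegs cs with
          | nil => exact absurd hseg hne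
          | cons r rs => simp [pvSegs, hseg, List.modifyHead, pvRowOf]
        · rw [show pvStepA (acc ++ [pre]) c = acc ++ [pre] by
                simp [pvStepA, h0, h1, hs]]
          rw [ih acc pre]
          cases hseg : pvSegs cs with
          | nil => exact absurd hseg hne
          | cons r rs => simp [pvSegs, hseg, List.modifyHead, pvRowOf, h0, h1, hs]

-- ===== VERDICT (by name: the statement is the Claim_ definition above) =====
theorem get_board_from_string_spec : Claim_equal_get_board_from_string := by
  intro s _
  unfold Spec_get_board_from_string get_board_from_string get_board_from_string_alt
  rw [pvSplitOn_eq_segs]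
  have := pvFoldl_spec s.toList [] []
  simp only [List.nil_append] at this
  rw [this]
  have hne := pvSegs_ne_nil s.toList
  cases hseg : pvSegs s.toList with
  | nil => exact absurd hseg hne
  | cons r rs => simp [List.modifyHead]
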